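-- pv_equiv track=rewrite | github.com/ProfesionalKillr/Taller_Funciones | Funciones/ejercicio3.py | curso
-- ===== SOURCE A (Python) =====
-- def curso(notas):
--     calificaciones = {}
--     for asignatura, nota in notas.items():
--         asignatura_mayusculas = asignatura.upper()
--         if nota < 5:
--             calificaciones[asignatura_mayusculas] = "Mal"
--         elif nota < 7:
--             calificaciones[asignatura_mayusculas] = "Regular"
--         elif nota < 9:
--             calificaciones[asignatura_mayusculas] = "Bueno"
--         elif nota < 10:
--             calificaciones[asignatura_mayusculas] = "Muy bien"
--         else:
--             calificaciones[asignatura_mayusculas] = "Excelente"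
--     return calificaciones
-- ===== SOURCE B (Python) =====
-- _THRESHOLDS = [5, 7, 9, 10]
-- _LABELS = ["Mal", "Regular", "Bueno", "Muy bien", "Excelente"]
--
--
-- def curso(notas):
--     # table-driven bucketing: the label index is the number of thresholds <= nota
--     return {asignatura.upper(): _LABELS[sum(t <= nota for t in _THRESHOLDS)]
--             for asignatura, nota in notas.items()}
-- ===== Notes on version B (the rewrite author's own statement) =====
-- stated objective: idiomatic
-- what changed: Replaces the if/elif cascade and imperative dict building with a dict comprehension over a sorted threshold table: the label index is computed as the count of thresholds <= nota and looked up in a parallel label list.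
import Mathlib
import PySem

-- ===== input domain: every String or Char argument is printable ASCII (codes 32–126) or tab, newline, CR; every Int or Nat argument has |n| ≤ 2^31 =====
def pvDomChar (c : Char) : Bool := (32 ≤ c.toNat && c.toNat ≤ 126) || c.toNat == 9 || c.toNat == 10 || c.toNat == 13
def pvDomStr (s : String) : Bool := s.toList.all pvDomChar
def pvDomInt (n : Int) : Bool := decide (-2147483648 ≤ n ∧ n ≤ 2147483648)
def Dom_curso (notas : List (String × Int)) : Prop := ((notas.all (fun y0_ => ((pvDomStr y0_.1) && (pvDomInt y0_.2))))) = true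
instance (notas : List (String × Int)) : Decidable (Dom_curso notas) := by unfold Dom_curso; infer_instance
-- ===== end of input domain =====

-- B replaces A's if/elif cascade with a threshold-table lookup (label index = count of thresholds ≤ nota); same O(n), idiomatic.


-- ===== PORT A =====
-- literal port of A: build a dict, if/elif cascade choosing the label
def curso (notas : List (String × Int)) : List (String × String) :=
  (notas.foldl
    (fun calificaciones p =>
      let asignatura_mayusculas := PySem.Str.upper p.1
      if p.2 < 5 then calificaciones.insert asignatura_mayusculas "Mal"
      else if p.2 < 7 then calificaciones.insert asignatura_mayusculas "Regular"
      else if p.2 < 9 then calificaciones.insert asignatura_mayusculas "Bueno"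
      else if p.2 < 10 then calificaciones.insert asignatura_mayusculas "Muy bien"
      else calificaciones.insert asignatura_mayusculas "Excelente")
    PySem.Dict.empty).items

-- ===== PORT B =====
def pvThresholds : List Int := [5, 7, 9, 10]
def pvLabels : List String := ["Mal", "Regular", "Bueno", "Muy bien", "Excelente"]

-- _LABELS[sum(t <= nota for t in _THRESHOLDS)]; the index is always 0..4, in range, so pyGetD's default is unreachable
def pvLabelOf (nota : Int) : String :=
  PySem.List.pyGetD pvLabels ((pvThresholds.map (fun t => if t ≤ nota then (1 : Int) else 0)).sum) ""

-- dict comprehension over notas.items()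
def curso_alt (notas : List (String × Int)) : List (String × String) :=
  (notas.foldl
    (fun d p => d.insert (PySem.Str.upper p.1) (pvLabelOf p.2))
    PySem.Dict.empty).items

-- ===== PRECONDITION & SPEC =====
def Spec_curso (notas : List (String × Int)) (out : List (String × String)) : Prop := out = curso_alt notas
instance (notas : List (String × Int)) (out : List (String × String)) : Decidable (Spec_curso notas out) := by unfold Spec_curso; infer_instance

-- ===== CLAIM (what is proved, stated in full; the proofs are below) =====
def Claim_equal_curso : Prop := ∀ (notas : List (String × Int)), Dom_curso notas → Spec_curso notas (curso notas)

-- ===== LEMMAS AND PROOFS =====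

-- the cascade label equals the table label, for every grade
theorem label_eq (n : Int) :
    (if n < 5 then "Mal" else if n < 7 then "Regular" else if n < 9 then "Bueno"
     else if n < 10 then "Muy bien" else "Excelente") = pvLabelOf n := by
  unfold pvLabelOf pvThresholds pvLabels
  by_cases h5 : n < 5
  · simp [h5, show ¬(5 ≤ n) by omega, show ¬(7 ≤ n) by omega, show ¬(9 ≤ n) by omega,
      show ¬(10 ≤ n) by omega, PySem.List.pyGetD]
  · by_cases h7 : n < 7
    · simp [h5, h7, show (5 ≤ n) by omega, show ¬(7 ≤ n) by omega, show ¬(9 ≤ n) by omega,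
        show ¬(10 ≤ n) by omega, PySem.List.pyGetD]
    · by_cases h9 : n < 9
      · simp [h5, h7, h9, show (5 ≤ n) by omega, show (7 ≤ n) by omega, show ¬(9 ≤ n) by omega,
          show ¬(10 ≤ n) by omega, PySem.List.pyGetD]
      · by_cases h10 : n < 10
        · simp [h5, h7, h9, h10, show (5 ≤ n) by omega, show (7 ≤ n) by omega,
            show (9 ≤ n) by omega, show ¬(10 ≤ n) by omega, PySem.List.pyGetD]
        · simp [h5, h7, h9, h10, show (5 ≤ n) by omega, show (7 ≤ n) by omega,
            show (9 ≤ n) by omega, show (10 ≤ n) by omega, PySem.List.pyGetD]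

-- the two loop bodies are the same function
theorem step_eq :
    (fun (calificaciones : PySem.Dict String String) (p : String × Int) =>
      let asignatura_mayusculas := PySem.Str.upper p.1
      if p.2 < 5 then calificaciones.insert asignatura_mayusculas "Mal"
      else if p.2 < 7 then calificaciones.insert asignatura_mayusculas "Regular"
      else if p.2 < 9 then calificaciones.insert asignatura_mayusculas "Bueno"
      else if p.2 < 10 then calificaciones.insert asignatura_mayusculas "Muy bien"
      else calificaciones.insert asignatura_mayusculas "Excelente")
    = (fun (d : PySem.Dict String String) (p : String × Int) =>
        d.insert (PySem.Str.upper p.1) (pvLabelOf p.2)) := by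
  funext d p
  simp only [← label_eq p.2]
  split_ifs <;> rfl

-- ===== VERDICT (by name: the statement is the Claim_ definition above) =====
theorem curso_spec : Claim_equal_curso := by
  intro notas _
  unfold Spec_curso curso curso_alt
  rw [step_eq]
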